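-- pv_equiv track=rewrite | github.com/ansh200516/aarhus | examples/foa/utils/math_utils.py | extract_last_boxed_answer
-- ===== SOURCE A (Python) =====
-- def extract_last_boxed_answer(text):
--     answers = [""]
--     for piece in text.split('boxed{')[1:]:
--         n = 0
--         for i in range(len(piece)):
--             if piece[i] == '{':
--                 n += 1
--             elif piece[i] == '}':
--                 n -= 1
--                 if n < 0:
--                     if i + 1 < len(piece) and piece[i + 1] == '%':
--                         answers.append(piece[: i + 1])
--                     else:
--                         answers.append(piece[:i])
--                     break
--     last_boxed = answers[-1]  # Take the last one
--     return last_boxed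
-- ===== SOURCE B (Python) =====
-- def extract_last_boxed_answer(text):
--     # Single left-to-right pass: no split, no pieces list; track the candidate
--     # currently being collected and overwrite `best` each time one closes.
--     best = ""
--     cur = None          # chars of the candidate currently being scanned, or None
--     depth = 0
--     i = 0
--     n = len(text)
--     while i < n:
--         if text.startswith('boxed{', i):
--             i += 6
--             cur = []
--             depth = 0
--             continue
--         c = text[i]
--         if cur is not None:
--             if c == '{':
--                 depth += 1
--                 cur.append(c)
--             elif c == '}':
--                 if depth == 0:
--                     best = ''.join(cur) + ('}' if text[i + 1:i + 2] == '%' else '')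
--                     cur = None
--                 else:
--                     depth -= 1
--                     cur.append(c)
--             else:
--                 cur.append(c)
--         i += 1
--     return best
-- ===== Notes on version B (the rewrite author's own statement) =====
-- stated objective: alternative
-- what changed: B replaces split-into-pieces + per-piece rescans + an answers list with a single left-to-right state-machine pass over the text that keeps only the current candidate and the latest closed answer.
import Mathlib
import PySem

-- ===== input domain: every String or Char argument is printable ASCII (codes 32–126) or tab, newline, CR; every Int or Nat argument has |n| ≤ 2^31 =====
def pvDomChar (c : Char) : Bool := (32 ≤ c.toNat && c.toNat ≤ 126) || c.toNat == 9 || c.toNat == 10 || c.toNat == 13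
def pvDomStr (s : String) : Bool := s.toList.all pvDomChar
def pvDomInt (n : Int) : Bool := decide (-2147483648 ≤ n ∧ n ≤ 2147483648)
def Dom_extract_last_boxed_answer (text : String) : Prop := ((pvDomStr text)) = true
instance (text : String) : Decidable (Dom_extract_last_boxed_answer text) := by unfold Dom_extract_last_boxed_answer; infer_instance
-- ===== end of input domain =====

-- B replaces A's split + per-piece scans + answers list by one state-machine pass; objective: alternative (same cost, plainer data flow).

-- ===== PORT A =====
def pvSep : List Char := ['b', 'o', 'x', 'e', 'd', '{']

-- A's inner `for i in range(len(piece))` loop: `acc` holds the scanned prefix reversed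
-- (so piece[:i] = acc.reverse), `n` is A's brace counter; returns the appended answer, none if no break.
def scanA : List Char → Int → List Char → Option (List Char)
  | [], _, _ => none
  | c :: r, n, acc =>
    if c = '{' then scanA r (n + 1) (c :: acc)
    else if c = '}' then
      if n - 1 < 0 then
        -- `i + 1 < len(piece) and piece[i + 1] == '%'`: the next char (if any) is '%'
        if r.head? = some '%' then some (c :: acc).reverse    -- piece[: i + 1]
        else some acc.reverse                                 -- piece[: i]
      else scanA r (n - 1) (c :: acc)
    else scanA r n (c :: acc)

def extract_last_boxed_answer (text : String) : String :=
  let pieces := (PySem.Chars.splitOn text.toList pvSep).drop 1   -- text.split('boxed{')[1:]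
  let answers := pieces.foldl (fun ans piece =>
      match scanA piece 0 [] with
      | some s => ans ++ [s]
      | none => ans) [([] : List Char)]
  String.ofList (answers.getLastD [])   -- answers[-1]; answers starts at [""] so it is never empty

-- ===== PORT B =====
-- B's while loop: state = some (cur, depth) while a candidate is being collected
-- (cur reversed, ''.join(cur) = cur.reverse), none otherwise; best is the running answer.
def goB : List Char → Option (List Char × Int) → List Char → List Char
  | [], _, best => best
  | c :: rest, none, best =>
    if pvSep.isPrefixOf (c :: rest) then goB (rest.drop 5) (some ([], 0)) best
    else goB rest none best
  | c :: rest, some (cur, depth), best =>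
    if pvSep.isPrefixOf (c :: rest) then goB (rest.drop 5) (some ([], 0)) best
    else if c = '{' then goB rest (some (c :: cur, depth + 1)) best
    else if c = '}' then
      if depth = 0 then
        goB rest none (cur.reverse ++ (if rest.take 1 = ['%'] then ['}'] else []))
      else goB rest (some (c :: cur, depth - 1)) best
    else goB rest (some (c :: cur, depth)) best
  termination_by l _ _ => l.length
  decreasing_by all_goals (simp [List.length_drop]; try omega)

def extract_last_boxed_answer_alt (text : String) : String :=
  String.ofList (goB text.toList none [])

-- ===== PRECONDITION & SPEC =====
def Spec_extract_last_boxed_answer (text : String) (out : String) : Prop := out = extract_last_boxed_answer_alt text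
instance (text : String) (out : String) : Decidable (Spec_extract_last_boxed_answer text out) := by unfold Spec_extract_last_boxed_answer; infer_instance

-- ===== CLAIM (what is proved, stated in full; the proofs are below) =====
def Claim_equal_extract_last_boxed_answer : Prop := ∀ (text : String), Dom_extract_last_boxed_answer text → Spec_extract_last_boxed_answer text (extract_last_boxed_answer text)

-- ===== LEMMAS AND PROOFS =====

-- the content of a piece: chars up to the next occurrence of pvSep (or the end)
def firstPiece : List Char → List Char
  | [] => []
  | l@(c :: rest) => if pvSep.isPrefixOf l then [] else c :: firstPiece rest

-- the pieces A iterates over (split(…)[1:])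
def pieces : List Char → List (List Char)
  | [] => []
  | c :: rest =>
    if pvSep.isPrefixOf (c :: rest) then firstPiece (rest.drop 5) :: pieces (rest.drop 5)
    else pieces rest
  termination_by l => l.length
  decreasing_by all_goals (simp [List.length_drop]; try omega)

-- A's outer loop collapsed to a fold keeping the last successful answer
def AFold (best : List Char) (ps : List (List Char)) : List Char :=
  ps.foldl (fun b p => (scanA p 0 []).getD b) best

theorem AFold_cons (best p : List Char) (ps : List (List Char)) :
    AFold best (p :: ps) = AFold ((scanA p 0 []).getD best) ps := rfl

theorem splitOn_go_eq (fuel : Nat) : ∀ (l cur : List Char) (acc : List (List Char)), l.length < fuel →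
    PySem.Chars.splitOn.go pvSep fuel l cur acc
      = acc.reverse ++ (cur.reverse ++ firstPiece l) :: pieces l := by
  induction fuel with
  | zero => intro l cur acc h; omega
  | succ fuel ih =>
    intro l cur acc h
    match l with
    | [] => simp [PySem.Chars.splitOn.go, firstPiece, pieces]
    | c :: rest =>
      rw [PySem.Chars.splitOn.go]
      by_cases hp : pvSep.isPrefixOf (c :: rest)
      · have hlen : (rest.drop 5).length < fuel := by
          simp only [List.length_drop]
          simp only [List.length_cons] at h; omega
        rw [if_pos hp]
        have hd6 : (c :: rest).drop pvSep.length = rest.drop 5 := by simp [pvSep]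
        rw [hd6, ih _ _ _ hlen]
        simp [firstPiece, pieces, hp]
      · have hlen : rest.length < fuel := by simp only [List.length_cons] at h; omega
        rw [if_neg hp, ih _ _ _ hlen]
        simp [firstPiece, pieces, hp]

theorem splitOn_eq (l : List Char) :
    (PySem.Chars.splitOn l pvSep).drop 1 = pieces l := by
  unfold PySem.Chars.splitOn
  rw [splitOn_go_eq (l.length + 1) l [] [] (by omega)]
  simp

theorem answers_last (ps : List (List Char)) : ∀ (ans0 : List (List Char)) (d : List Char),
    (ps.foldl (fun ans piece =>
        match scanA piece 0 [] with
        | some s => ans ++ [s]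
        | none => ans) ans0).getLastD d
      = AFold (ans0.getLastD d) ps := by
  induction ps with
  | nil => intro ans0 d; rfl
  | cons p ps ih =>
    intro ans0 d
    rw [List.foldl_cons, ih, AFold_cons]
    congr 1
    cases hs : scanA p 0 [] with
    | some s => simp
    | none => simp

-- the lookahead agreement: the current piece's remainder starts with '%' iff the
-- whole text's remainder does (a piece boundary always starts with 'b', never '%')
theorem pct_iff (rest : List Char) :
    (firstPiece rest).head? = some '%' ↔ rest.take 1 = ['%'] := by
  cases rest with
  | nil => simp [firstPiece]
  | cons x r =>
    by_cases hp : pvSep.isPrefixOf (x :: r)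
    · have hx : x = 'b' := by
        simp only [pvSep, List.isPrefixOf, Bool.and_eq_true, beq_iff_eq] at hp
        exact hp.1.symm
      subst hx
      simp [firstPiece, hp]
    · simp only [firstPiece]
      rw [if_neg hp]
      simp

theorem goB_eq (n : Nat) : ∀ (l : List Char), l.length ≤ n → ∀ (best : List Char),
    (goB l none best = AFold best (pieces l)) ∧
    (∀ (cur : List Char) (depth : Int), 0 ≤ depth →
      goB l (some (cur, depth)) best
        = AFold ((scanA (firstPiece l) depth cur).getD best) (pieces l)) := by
  induction n with
  | zero =>
    intro l hl best
    have hnil : l = [] := List.eq_nil_of_length_eq_zero (Nat.le_zero.mp hl)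
    subst hnil
    constructor
    · simp [goB, pieces, AFold]
    · intro cur depth _
      simp [goB, pieces, firstPiece, scanA, AFold]
  | succ n ih =>
    intro l hl best
    match l with
    | [] =>
      constructor
      · simp [goB, pieces, AFold]
      · intro cur depth _
        simp [goB, pieces, firstPiece, scanA, AFold]
    | c :: rest =>
      have hrest : rest.length ≤ n := by simp only [List.length_cons] at hl; omega
      have hdrop : (rest.drop 5).length ≤ n := by simp only [List.length_drop]; omega
      by_cases hp : pvSep.isPrefixOf (c :: rest)
      · constructor
        · rw [goB, if_pos hp, (ih _ hdrop best).2 [] 0 le_rfl]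
          simp [pieces, hp, AFold_cons]
        · intro cur depth _
          rw [goB, if_pos hp, (ih _ hdrop best).2 [] 0 le_rfl]
          simp [pieces, firstPiece, hp, scanA, AFold_cons]
      · have hfp : firstPiece (c :: rest) = c :: firstPiece rest := by
          simp [firstPiece, hp]
        have hpieces : pieces (c :: rest) = pieces rest := by
          simp [pieces, hp]
        constructor
        · rw [goB, if_neg hp, (ih _ hrest best).1, hpieces]
        · intro cur depth hd
          rw [goB, if_neg hp]
          rw [hfp, hpieces]
          by_cases hc1 : c = '{'
          · subst hc1
            rw [if_pos rfl, (ih _ hrest best).2 ('{' :: cur) (depth + 1) (by omega)]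
            simp [scanA]
          · by_cases hc2 : c = '}'
            · subst hc2
              rw [if_neg hc1, if_pos rfl]
              by_cases hd0 : depth = 0
              · subst hd0
                rw [if_pos rfl, (ih _ hrest _).1]
                have hval : (scanA ('}' :: firstPiece rest) 0 cur).getD best
                    = cur.reverse ++ (if rest.take 1 = ['%'] then ['}'] else []) := by
                  rw [scanA, if_neg hc1, if_pos rfl,
                    if_pos (by omega : (0 : Int) - 1 < 0)]
                  by_cases hpc : rest.take 1 = ['%']
                  · rw [if_pos ((pct_iff rest).mpr hpc), if_pos hpc]
                    simp
                  · rw [if_neg (fun h => hpc ((pct_iff rest).mp h)), if_neg hpc]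
                    simp
                rw [hval]
              · rw [if_neg hd0, (ih _ hrest best).2 ('}' :: cur) (depth - 1) (by omega)]
                rw [scanA, if_neg hc1, if_pos rfl,
                  if_neg (by omega : ¬ ((depth : Int) - 1 < 0))]
            · rw [if_neg hc1, if_neg hc2,
                (ih _ hrest best).2 (c :: cur) depth hd]
              simp [scanA, hc1, hc2]

-- ===== VERDICT (by name: the statement is the Claim_ definition above) =====
theorem extract_last_boxed_answer_spec : Claim_equal_extract_last_boxed_answer := by
  intro text _
  unfold Spec_extract_last_boxed_answer extract_last_boxed_answer extract_last_boxed_answer_alt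
  simp only [splitOn_eq, answers_last]
  rw [(goB_eq text.toList.length text.toList le_rfl []).1]
  rfl
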